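-- pv_equiv track=rewrite | github.com/bitextor/biroamer | biner.py | color_segments
-- ===== SOURCE A (Python) =====
-- def color_segments(segment, points, opentag="<entity>", closetag="</entity>"):
--     """Put <entity> tags inside the segment according to alignment points."""
--
--     result = []
--     offset = 0
--     open_i = 0
--     close_i = 0
--     i = 0
--     while i < len(segment):
--         if close_i < len(points) and offset == points[close_i][1] and open_i != close_i:
--             result.append(closetag)
--             close_i += 1
--             continue
--         elif open_i < len(points) and points[open_i][0] == offset and not segment[i] == " ":
--             result.append(opentag)
--             open_i += 1
--         result.append(segment[i])
--         if segment[i] != " ":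
--             offset += 1
--         i += 1
--
--     if open_i != close_i:
--         result.append(closetag)
--
--     return "".join(result)
-- ===== SOURCE B (Python) =====
-- def color_segments(segment, points, opentag="<entity>", closetag="</entity>"):
--     """Put <entity> tags inside the segment according to alignment points."""
--     # Tokenize once: each run is (space_prefix, nonspace_char); leftover spaces trail.
--     runs = []
--     buf = []
--     for ch in segment:
--         if ch == " ":
--             buf.append(ch)
--         else:
--             runs.append(("".join(buf), ch))
--             buf = []
--     trailing = "".join(buf)
--
--     out = []
--     n = len(points)
--     open_i = 0
--     close_i = 0
--     v = 0
--     for sp, ch in runs: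
--         while close_i < n and points[close_i][1] == v and open_i != close_i:
--             out.append(closetag)
--             close_i += 1
--         out.append(sp)
--         if open_i < n and points[open_i][0] == v:
--             out.append(opentag)
--             open_i += 1
--         out.append(ch)
--         v += 1
--     if trailing:
--         while close_i < n and points[close_i][1] == v and open_i != close_i:
--             out.append(closetag)
--             close_i += 1
--         out.append(trailing)
--     if open_i != close_i:
--         out.append(closetag)
--     return "".join(out)
-- ===== Notes on version B (the rewrite author's own statement) =====
-- stated objective: faster
-- what changed: B tokenizes the segment once into (space-prefix, non-space-char) runs and then drives the two point cursors over runs (one close while-loop per run plus a trailing-spaces block), instead of A's single character-position while-loop with `continue` re-entry and per-character offset/space bookkeeping.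
import Mathlib
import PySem

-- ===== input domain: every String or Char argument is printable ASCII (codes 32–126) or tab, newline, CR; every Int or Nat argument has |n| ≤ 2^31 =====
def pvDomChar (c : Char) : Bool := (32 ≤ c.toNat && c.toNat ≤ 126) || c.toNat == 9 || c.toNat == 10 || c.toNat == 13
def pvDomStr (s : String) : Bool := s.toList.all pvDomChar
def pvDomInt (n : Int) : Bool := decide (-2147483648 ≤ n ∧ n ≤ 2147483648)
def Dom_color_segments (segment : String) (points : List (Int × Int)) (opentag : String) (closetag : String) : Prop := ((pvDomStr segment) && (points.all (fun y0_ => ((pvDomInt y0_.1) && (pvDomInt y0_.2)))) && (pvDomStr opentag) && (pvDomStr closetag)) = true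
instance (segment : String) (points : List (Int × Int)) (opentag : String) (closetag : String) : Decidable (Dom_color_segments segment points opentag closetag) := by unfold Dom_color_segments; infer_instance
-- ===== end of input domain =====

-- B re-implements A by tokenizing the segment once into (space-prefix, non-space-char) runs and
-- looping over runs with the two point cursors — a different decomposition, same exact output.

-- ===== PORT A =====
-- A's while-loop over character positions; `continue` on a fired close re-enters at the same
-- position, here the recursive call on the unchanged list.
def colorLoopA (points : List (Int × Int)) (opentag closetag : List Char)
    (l : List Char) (offset : Int) (open_i close_i : Nat) (result : List (List Char)) : List (List Char) :=
  match l with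
  | [] => if open_i ≠ close_i then result ++ [closetag] else result
  | c :: rest =>
    if _h : close_i < points.length ∧ offset = (points.getD close_i (0,0)).2 ∧ open_i ≠ close_i then
      colorLoopA points opentag closetag (c :: rest) offset open_i (close_i + 1) (result ++ [closetag])
    else
      let p : Nat × List (List Char) :=
        if open_i < points.length ∧ (points.getD open_i (0,0)).1 = offset ∧ c ≠ ' ' then
          (open_i + 1, result ++ [opentag])
        else (open_i, result)
      colorLoopA points opentag closetag rest (if c ≠ ' ' then offset + 1 else offset)
        p.1 close_i (p.2 ++ [[c]])
termination_by (l.length * (points.length + 1) + (points.length - close_i))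
decreasing_by
  all_goals simp
  all_goals omega

def color_segments (segment : String) (points : List (Int × Int)) (opentag : String) (closetag : String) : String :=
  String.ofList (PySem.Chars.join [] (colorLoopA points opentag.toList closetag.toList segment.toList 0 0 0 []))

-- ===== PORT B =====
-- tokenizer: the segment as a list of (space-prefix, non-space char) runs plus trailing spaces
def runsOfB (l : List Char) (buf : List Char) : List (List Char × Char) × List Char :=
  match l with
  | [] => ([], buf)
  | c :: rest =>
    if c = ' ' then runsOfB rest (buf ++ [c])
    else
      let r := runsOfB rest []
      ((buf, c) :: r.1, r.2)

-- the inner `while` emitting close tags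
def closeLoopB (points : List (Int × Int)) (closetag : List Char)
    (v : Int) (open_i close_i : Nat) (out : List (List Char)) : Nat × List (List Char) :=
  if _h : close_i < points.length ∧ (points.getD close_i (0,0)).2 = v ∧ open_i ≠ close_i then
    closeLoopB points closetag v open_i (close_i + 1) (out ++ [closetag])
  else (close_i, out)
termination_by points.length - close_i

-- the `for sp, ch in runs` loop
def runLoopB (points : List (Int × Int)) (opentag closetag : List Char)
    (runs : List (List Char × Char)) (v : Int) (open_i close_i : Nat) (out : List (List Char)) :
    Int × Nat × Nat × List (List Char) :=
  match runs with
  | [] => (v, open_i, close_i, out)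
  | (sp, ch) :: rest =>
    let q := closeLoopB points closetag v open_i close_i out
    let out1 := q.2 ++ [sp]
    let p : Nat × List (List Char) :=
      if open_i < points.length ∧ (points.getD open_i (0,0)).1 = v then
        (open_i + 1, out1 ++ [opentag])
      else (open_i, out1)
    runLoopB points opentag closetag rest (v + 1) p.1 q.1 (p.2 ++ [[ch]])

-- runs loop + trailing block + final unmatched close (Source B after the tokenizer)
def tagRunsB (points : List (Int × Int)) (opentag closetag : List Char)
    (l : List Char) (v : Int) (open_i close_i : Nat) (out : List (List Char)) : List (List Char) :=
  let rt := runsOfB l []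
  let st := runLoopB points opentag closetag rt.1 v open_i close_i out
  let fin : Nat × List (List Char) :=
    if rt.2 ≠ [] then
      let q := closeLoopB points closetag st.1 st.2.1 st.2.2.1 st.2.2.2
      (q.1, q.2 ++ [rt.2])
    else (st.2.2.1, st.2.2.2)
  if st.2.1 ≠ fin.1 then fin.2 ++ [closetag] else fin.2

def color_segments_alt (segment : String) (points : List (Int × Int)) (opentag : String) (closetag : String) : String :=
  String.ofList (PySem.Chars.join [] (tagRunsB points opentag.toList closetag.toList segment.toList 0 0 0 []))

-- ===== PRECONDITION & SPEC =====
def Spec_color_segments (segment : String) (points : List (Int × Int)) (opentag : String) (closetag : String) (out : String) : Prop := out = color_segments_alt segment points opentag closetag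
instance (segment : String) (points : List (Int × Int)) (opentag : String) (closetag : String) (out : String) : Decidable (Spec_color_segments segment points opentag closetag out) := by unfold Spec_color_segments; infer_instance

-- ===== CLAIM (what is proved, stated in full; the proofs are below) =====
def Claim_equal_color_segments : Prop := ∀ (segment : String) (points : List (Int × Int)) (opentag : String) (closetag : String), Dom_color_segments segment points opentag closetag → Spec_color_segments segment points opentag closetag (color_segments segment points opentag closetag)

-- ===== LEMMAS AND PROOFS =====

-- proof-only view of B's tail: the run loop + trailing block + final close, over explicit runs
def tagGo (points : List (Int × Int)) (opentag closetag : List Char)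
    (runs : List (List Char × Char)) (tr : List Char) (v : Int) (open_i close_i : Nat)
    (out : List (List Char)) : List (List Char) :=
  let st := runLoopB points opentag closetag runs v open_i close_i out
  let fin : Nat × List (List Char) :=
    if tr ≠ [] then
      let q := closeLoopB points closetag st.1 st.2.1 st.2.2.1 st.2.2.2
      (q.1, q.2 ++ [tr])
    else (st.2.2.1, st.2.2.2)
  if st.2.1 ≠ fin.1 then fin.2 ++ [closetag] else fin.2

theorem tagRunsB_eq_tagGo (points : List (Int × Int)) (opentag closetag : List Char)
    (l : List Char) (v : Int) (o c : Nat) (out : List (List Char)) :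
    tagRunsB points opentag closetag l v o c out
      = tagGo points opentag closetag (runsOfB l []).1 (runsOfB l []).2 v o c out := rfl

-- shape of the tokenizer with a non-empty pending space buffer
theorem runsOfB_buf (l : List Char) (buf : List Char) :
    runsOfB l buf =
      ((match (runsOfB l []).1 with
        | [] => ([] : List (List Char × Char))
        | (sp, ch) :: rs => (buf ++ sp, ch) :: rs),
       (match (runsOfB l []).1 with
        | [] => buf ++ (runsOfB l []).2
        | _ :: _ => (runsOfB l []).2)) := by
  induction l generalizing buf with
  | nil => simp [runsOfB]
  | cons c rest ih =>
    by_cases hc : c = ' '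
    · rw [show runsOfB (c :: rest) buf = runsOfB rest (buf ++ [c]) by simp [runsOfB, hc],
        show runsOfB (c :: rest) [] = runsOfB rest ([] ++ [c]) by simp [runsOfB, hc],
        ih (buf ++ [c]), ih ([] ++ [c])]
      cases hr : (runsOfB rest []).1 with
      | nil => simp
      | cons r rs => obtain ⟨sp, ch⟩ := r; simp
    · simp [runsOfB, hc]

-- the tokenizer on an all-space segment returns the segment as trailing spaces
theorem runsOfB_nil_tr (l : List Char) :
    (runsOfB l []).1 = [] → (runsOfB l []).2 = l := by
  induction l with
  | nil => simp [runsOfB]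
  | cons c rest ih =>
    by_cases hc : c = ' '
    · rw [show runsOfB (c :: rest) [] = runsOfB rest ([] ++ [c]) by simp [runsOfB, hc],
        runsOfB_buf rest ([] ++ [c])]
      cases hr : (runsOfB rest []).1 with
      | nil => intro _; simp [ih hr, hc]
      | cons r rs => obtain ⟨sp, ch⟩ := r; simp
    · simp [runsOfB, hc]

-- accumulator laws: each loop only appends to `out`
theorem closeLoopB_acc (points : List (Int × Int)) (closetag : List Char) (v : Int) (o : Nat) :
    ∀ n c out, points.length - c ≤ n →
      closeLoopB points closetag v o c out
        = ((closeLoopB points closetag v o c []).1,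
           out ++ (closeLoopB points closetag v o c []).2) := by
  intro n
  induction n with
  | zero =>
    intro c out hn
    have h : ¬ (c < points.length ∧ (points.getD c (0,0)).2 = v ∧ o ≠ c) := by
      intro h; omega
    rw [closeLoopB, dif_neg h, closeLoopB, dif_neg h]
    simp
  | succ n ih =>
    intro c out hn
    by_cases h : c < points.length ∧ (points.getD c (0,0)).2 = v ∧ o ≠ c
    · rw [closeLoopB, dif_pos h, ih (c+1) (out ++ [closetag]) (by omega)]
      conv_rhs => rw [closeLoopB, dif_pos h, ih (c+1) ([] ++ [closetag]) (by omega)]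
      simp
    · rw [closeLoopB, dif_neg h, closeLoopB, dif_neg h]
      simp

theorem closeLoopB_acc' (points : List (Int × Int)) (closetag : List Char) (v : Int) (o c : Nat)
    (out : List (List Char)) :
    closeLoopB points closetag v o c out
      = ((closeLoopB points closetag v o c []).1,
         out ++ (closeLoopB points closetag v o c []).2) :=
  closeLoopB_acc points closetag v o (points.length - c) c out (le_refl _)

theorem runLoopB_acc (points : List (Int × Int)) (opentag closetag : List Char) :
    ∀ runs v o c (out : List (List Char)),
      runLoopB points opentag closetag runs v o c out
        = ((runLoopB points opentag closetag runs v o c []).1,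
           (runLoopB points opentag closetag runs v o c []).2.1,
           (runLoopB points opentag closetag runs v o c []).2.2.1,
           out ++ (runLoopB points opentag closetag runs v o c []).2.2.2) := by
  intro runs
  induction runs with
  | nil => intro v o c out; simp [runLoopB]
  | cons r rest ih =>
    intro v o c out
    obtain ⟨sp, ch⟩ := r
    simp only [runLoopB]
    rw [closeLoopB_acc' points closetag v o c out]
    by_cases g : o < points.length ∧ (points.getD o (0,0)).1 = v
    · simp only [if_pos g]
      conv_lhs => rw [ih]
      conv_rhs => rw [ih]
      simp
    · simp only [if_neg g]
      conv_lhs => rw [ih]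
      conv_rhs => rw [ih]
      simp

theorem tagGo_acc (points : List (Int × Int)) (opentag closetag : List Char)
    (runs : List (List Char × Char)) (tr : List Char) (v : Int) (o c : Nat)
    (out : List (List Char)) :
    tagGo points opentag closetag runs tr v o c out
      = out ++ tagGo points opentag closetag runs tr v o c [] := by
  simp only [tagGo]
  rw [runLoopB_acc]
  generalize (runLoopB points opentag closetag runs v o c []) = R
  obtain ⟨V, O, C, OUT⟩ := R
  simp only
  by_cases htr : tr ≠ []
  · simp only [if_pos htr]
    rw [closeLoopB_acc' points closetag V O C (out ++ OUT),
      closeLoopB_acc' points closetag V O C OUT]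
    by_cases hoc : O ≠ (closeLoopB points closetag V O C []).1
    · simp [hoc]
    · simp [hoc]
  · simp only [if_neg htr]
    by_cases hoc : O ≠ C
    · simp [hoc]
    · simp [hoc]

-- one run consumed by B's run loop
theorem tagGo_cons (points : List (Int × Int)) (opentag closetag : List Char)
    (sp : List Char) (ch : Char) (rs : List (List Char × Char)) (tr : List Char)
    (v : Int) (o c : Nat) (out : List (List Char)) :
    tagGo points opentag closetag ((sp, ch) :: rs) tr v o c out
      = tagGo points opentag closetag rs tr (v+1)
          (if o < points.length ∧ (points.getD o (0,0)).1 = v then o+1 else o)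
          (closeLoopB points closetag v o c out).1
          ((if o < points.length ∧ (points.getD o (0,0)).1 = v
            then (closeLoopB points closetag v o c out).2 ++ [sp] ++ [opentag]
            else (closeLoopB points closetag v o c out).2 ++ [sp]) ++ [[ch]]) := by
  by_cases g : o < points.length ∧ (points.getD o (0,0)).1 = v
  · simp only [tagGo, runLoopB, if_pos g]
  · simp only [tagGo, runLoopB, if_neg g]

-- B takes the same close step as A's `continue` branch
theorem tagGo_close_step (points : List (Int × Int)) (opentag closetag : List Char)
    (l : List Char) (v : Int) (o c : Nat) (out : List (List Char)) (hl : l ≠ [])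
    (h : c < points.length ∧ v = (points.getD c (0,0)).2 ∧ o ≠ c) :
    tagRunsB points opentag closetag l v o c out
      = tagRunsB points opentag closetag l v o (c+1) (out ++ [closetag]) := by
  have h' : c < points.length ∧ (points.getD c (0,0)).2 = v ∧ o ≠ c := ⟨h.1, h.2.1.symm, h.2.2⟩
  have hstep : ∀ out', closeLoopB points closetag v o c out'
      = closeLoopB points closetag v o (c+1) (out' ++ [closetag]) := by
    intro out'; rw [closeLoopB, dif_pos h']
  rw [tagRunsB_eq_tagGo, tagRunsB_eq_tagGo]
  cases hr : (runsOfB l []).1 with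
  | cons r rs =>
    obtain ⟨sp, ch⟩ := r
    rw [tagGo_cons, tagGo_cons, hstep out]
  | nil =>
    have htr : (runsOfB l []).2 = l := runsOfB_nil_tr l hr
    simp only [tagGo, runLoopB, htr, if_pos hl, hstep out]

-- B consumes a leading space exactly as A does when no close fires
theorem tagGo_space_step (points : List (Int × Int)) (opentag closetag : List Char)
    (rest : List Char) (v : Int) (o c : Nat) (out : List (List Char))
    (h : ¬ (c < points.length ∧ v = (points.getD c (0,0)).2 ∧ o ≠ c)) :
    (tagRunsB points opentag closetag (' ' :: rest) v o c out).flatten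
      = (tagRunsB points opentag closetag rest v o c (out ++ [[' ']])).flatten := by
  have h' : ¬ (c < points.length ∧ (points.getD c (0,0)).2 = v ∧ o ≠ c) :=
    fun hc => h ⟨hc.1, hc.2.1.symm, hc.2.2⟩
  have hnoop : ∀ out', closeLoopB points closetag v o c out' = (c, out') := by
    intro out'; rw [closeLoopB, dif_neg h']
  rw [tagRunsB_eq_tagGo, tagRunsB_eq_tagGo]
  rw [show runsOfB (' ' :: rest) [] = runsOfB rest ([] ++ [' ']) from by simp [runsOfB],
    runsOfB_buf rest ([] ++ [' '])]
  cases hr : (runsOfB rest []).1 with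
  | cons r rs =>
    obtain ⟨sp, ch⟩ := r
    simp only
    rw [tagGo_cons, tagGo_cons, hnoop, hnoop]
    rw [tagGo_acc, tagGo_acc points opentag closetag rs _ _ _ _
      ((if o < points.length ∧ (points.getD o (0,0)).1 = v
        then (out ++ [[' ']]) ++ [sp] ++ [opentag]
        else (out ++ [[' ']]) ++ [sp]) ++ [[ch]])]
    split_ifs <;> simp
  | nil =>
    simp only
    by_cases htr : (runsOfB rest []).2 = []
    · simp [tagGo, runLoopB, hnoop, htr]
    · simp only [tagGo, runLoopB, hnoop]
      split_ifs <;> simp_all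

-- B consumes a leading non-space character exactly as A does when no close fires
theorem tagGo_char_step (points : List (Int × Int)) (opentag closetag : List Char)
    (c0 : Char) (rest : List Char) (v : Int) (o c : Nat) (out : List (List Char))
    (hc0 : c0 ≠ ' ')
    (h : ¬ (c < points.length ∧ v = (points.getD c (0,0)).2 ∧ o ≠ c)) :
    (tagRunsB points opentag closetag (c0 :: rest) v o c out).flatten
      = (tagRunsB points opentag closetag rest (v+1)
          (if o < points.length ∧ (points.getD o (0,0)).1 = v then o+1 else o) c
          ((if o < points.length ∧ (points.getD o (0,0)).1 = v then out ++ [opentag] else out)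
            ++ [[c0]])).flatten := by
  have h' : ¬ (c < points.length ∧ (points.getD c (0,0)).2 = v ∧ o ≠ c) :=
    fun hc => h ⟨hc.1, hc.2.1.symm, hc.2.2⟩
  have hnoop : ∀ out', closeLoopB points closetag v o c out' = (c, out') := by
    intro out'; rw [closeLoopB, dif_neg h']
  rw [tagRunsB_eq_tagGo, tagRunsB_eq_tagGo]
  rw [show runsOfB (c0 :: rest) []
      = (([], c0) :: (runsOfB rest []).1, (runsOfB rest []).2) from by simp [runsOfB, hc0]]
  simp only
  rw [tagGo_cons, hnoop]
  rw [tagGo_acc, tagGo_acc points opentag closetag (runsOfB rest []).1 _ _ _ _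
    ((if o < points.length ∧ (points.getD o (0,0)).1 = v then out ++ [opentag] else out)
      ++ [[c0]])]
  split_ifs <;> simp

theorem main_flatten (points : List (Int × Int)) (opentag closetag : List Char) :
    ∀ l v o c res, (colorLoopA points opentag closetag l v o c res).flatten
      = (tagRunsB points opentag closetag l v o c res).flatten := by
  intro l v o c res
  induction l, v, o, c, res using colorLoopA.induct points opentag closetag with
  | case1 v o c res hoc =>
    rw [colorLoopA]
    simp [tagRunsB_eq_tagGo, tagGo, runLoopB, runsOfB, hoc]
  | case2 v o c res hoc =>
    rw [colorLoopA]
    simp [tagRunsB_eq_tagGo, tagGo, runLoopB, runsOfB, hoc]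
  | case3 v o c res c0 rest h ih =>
    rw [colorLoopA, dif_pos h, ih,
      tagGo_close_step points opentag closetag (c0 :: rest) v o c res (by simp)
        ⟨h.1, h.2.1, h.2.2⟩]
  | case4 v o c res c0 rest h p ih =>
    rw [colorLoopA, dif_neg h]
    have hp : p = (if _h : o < points.length ∧ (points.getD o (0,0)).1 = v ∧ c0 ≠ ' '
        then (o + 1, res ++ [opentag]) else (o, res)) := rfl
    by_cases hc0 : c0 = ' '
    · subst hc0
      have hp' : p = (o, res) := by rw [hp]; simp
      rw [hp'] at ih
      simp only [ne_eq, not_true_eq_false, dite_false, ite_false, and_false] at ih ⊢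
      exact ih.trans (tagGo_space_step points opentag closetag rest v o c res h).symm
    · have hs := tagGo_char_step points opentag closetag c0 rest v o c res hc0 h
      by_cases g : o < points.length ∧ (points.getD o (0,0)).1 = v
      · have gA : o < points.length ∧ (points.getD o (0,0)).1 = v ∧ c0 ≠ ' ' := ⟨g.1, g.2, hc0⟩
        have hp' : p = (o + 1, res ++ [opentag]) := by rw [hp, dif_pos gA]
        rw [hp'] at ih
        rw [if_pos gA, if_pos hc0]
        rw [if_pos g, if_pos g] at hs
        simp only [dif_pos hc0] at ih
        exact ih.trans hs.symm
      · have gA : ¬ (o < points.length ∧ (points.getD o (0,0)).1 = v ∧ c0 ≠ ' ') :=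
          fun hx => g ⟨hx.1, hx.2.1⟩
        have hp' : p = (o, res) := by rw [hp, dif_neg gA]
        rw [hp'] at ih
        rw [if_neg gA, if_pos hc0]
        rw [if_neg g, if_neg g] at hs
        simp only [dif_pos hc0] at ih
        exact ih.trans hs.symm

theorem join_nil_eq_flatten (xss : List (List Char)) : PySem.Chars.join [] xss = xss.flatten := by
  show List.intercalate [] xss = xss.flatten
  induction xss with
  | nil => rfl
  | cons x xs ih =>
    cases xs with
    | nil => simp [List.intercalate]
    | cons y ys =>
      simp [List.intercalate] at *
      simpa using ih

-- ===== VERDICT (by name: the statement is the Claim_ definition above) =====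
theorem color_segments_spec : Claim_equal_color_segments := by
  intro segment points opentag closetag _
  unfold Spec_color_segments color_segments color_segments_alt
  rw [join_nil_eq_flatten, join_nil_eq_flatten, main_flatten]
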